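-- pv_equiv track=rewrite | github.com/beakjinu/Coding-test | 프로그래머스/3/150367. 표현 가능한 이진트리/표현 가능한 이진트리.py | change_to_binary
-- ===== SOURCE A (Python) =====
-- def change_to_binary(num):
--     binary_str = bin(num)[2:]
--     length = len(binary_str)
--     height = 1
--     while (2 ** height - 1) < length:
--         height += 1
--     size = 2 ** height - 1
--     add_zeros = size - length
--     return "0" * add_zeros + binary_str
-- ===== SOURCE B (Python) =====
-- def change_to_binary(num):
--     binary_str = bin(num)[2:]
--     length = len(binary_str)
--     size = 2 ** length.bit_length() - 1
--     return "0" * (size - length) + binary_str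
-- ===== Notes on version B (the rewrite author's own statement) =====
-- stated objective: idiomatic
-- what changed: Replaces the iterative while-loop search for the perfect-tree height with a closed-form bit_length computation of the smallest height whose full-tree size covers the binary string.
import Mathlib
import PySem

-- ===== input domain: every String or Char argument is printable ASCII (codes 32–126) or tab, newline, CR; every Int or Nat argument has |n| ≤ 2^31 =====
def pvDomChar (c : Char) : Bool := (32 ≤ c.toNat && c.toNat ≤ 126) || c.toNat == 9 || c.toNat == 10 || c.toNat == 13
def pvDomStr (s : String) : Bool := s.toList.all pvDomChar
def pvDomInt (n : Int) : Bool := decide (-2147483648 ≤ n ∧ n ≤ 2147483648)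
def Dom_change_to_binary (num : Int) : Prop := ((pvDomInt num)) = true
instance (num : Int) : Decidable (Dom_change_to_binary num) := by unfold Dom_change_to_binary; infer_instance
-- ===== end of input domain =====

-- B replaces A's while-loop height search by the closed form length.bit_length() (idiomatic, same result).


-- ===== PORT A =====
-- binary digits of a positive natural, most-significant first (empty for 0)
def natBits : Nat → List Char
  | 0 => []
  | n + 1 => natBits ((n + 1) / 2) ++ [if (n + 1) % 2 = 1 then '1' else '0']
decreasing_by exact Nat.div_lt_self (Nat.succ_pos n) (by norm_num)

-- bin(num)[2:] : for num < 0 Python yields 'b' followed by the digits of |num| (bin(-5) = '-0b101')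
def pyBinTail (num : Int) : List Char :=
  if num < 0 then 'b' :: natBits num.natAbs
  else if num = 0 then ['0']
  else natBits num.natAbs

-- A's while loop: increment height while 2^height - 1 < length
def heightLoop (length height : Nat) : Nat :=
  if 2 ^ height - 1 < length then heightLoop length (height + 1) else height
termination_by length - height
decreasing_by
  have h1 : height < 2 ^ height := Nat.lt_two_pow_self
  omega

def change_to_binary (num : Int) : String :=
  let binary_str := pyBinTail num
  let length := binary_str.length
  let height := heightLoop length 1
  let size := 2 ^ height - 1
  let add_zeros := size - length
  String.mk (List.replicate add_zeros '0' ++ binary_str)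

-- ===== PORT B =====
-- length.bit_length() is Nat.size
def change_to_binary_alt (num : Int) : String :=
  let binary_str := pyBinTail num
  let length := binary_str.length
  let size := 2 ^ Nat.size length - 1
  String.mk (List.replicate (size - length) '0' ++ binary_str)

-- ===== PRECONDITION & SPEC =====
def Spec_change_to_binary (num : Int) (out : String) : Prop := out = change_to_binary_alt num
instance (num : Int) (out : String) : Decidable (Spec_change_to_binary num out) := by unfold Spec_change_to_binary; infer_instance

-- ===== CLAIM (what is proved, stated in full; the proofs are below) =====
def Claim_equal_change_to_binary : Prop := ∀ (num : Int), Dom_change_to_binary num → Spec_change_to_binary num (change_to_binary num)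

-- ===== LEMMAS AND PROOFS =====

lemma natBits_pos_ne_nil (n : Nat) (h : 0 < n) : natBits n ≠ [] := by
  cases n with
  | zero => omega
  | succ m => rw [natBits]; simp

lemma pyBinTail_ne_nil (num : Int) : pyBinTail num ≠ [] := by
  unfold pyBinTail
  split
  · simp
  · split
    · simp
    · exact natBits_pos_ne_nil _ (by omega)

lemma heightLoop_eq_size (L h : Nat) (hh : h ≤ L.size) : heightLoop L h = L.size := by
  have hmeas : L.size - h < L.size - h + 1 := Nat.lt_succ_self _
  induction hd : L.size - h generalizing h with
  | zero =>
    have : h = L.size := by omega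
    subst this
    rw [heightLoop]
    have : L < 2 ^ L.size := Nat.lt_size_self L
    simp [Nat.not_lt.mpr (by omega : 2 ^ L.size - 1 ≥ L)]
  | succ k ih =>
    have hlt : h < L.size := by omega
    have h2 : ¬ L < 2 ^ h := by
      intro hc
      exact absurd (Nat.size_le.mpr hc) (by omega)
    have hpos : 0 < 2 ^ h := Nat.two_pow_pos h
    rw [heightLoop]
    simp only [if_pos (by omega : 2 ^ h - 1 < L)]
    exact ih (h + 1) (by omega) (by omega) (by omega)

theorem change_to_binary_eq_alt (num : Int) : change_to_binary num = change_to_binary_alt num := by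
  have hne := pyBinTail_ne_nil num
  have hlen : 0 < (pyBinTail num).length := List.length_pos_iff.mpr hne
  have hsize : 1 ≤ Nat.size (pyBinTail num).length := by
    have := Nat.size_pos.mpr hlen
    omega
  have hA : change_to_binary num = String.mk (List.replicate (2 ^ heightLoop (pyBinTail num).length 1 - 1 - (pyBinTail num).length) '0' ++ pyBinTail num) := rfl
  have hB : change_to_binary_alt num = String.mk (List.replicate (2 ^ Nat.size (pyBinTail num).length - 1 - (pyBinTail num).length) '0' ++ pyBinTail num) := rfl
  rw [hA, hB, heightLoop_eq_size _ _ hsize]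

-- ===== VERDICT (by name: the statement is the Claim_ definition above) =====
theorem change_to_binary_spec : Claim_equal_change_to_binary := by
  intro num _
  exact change_to_binary_eq_alt num
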